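-- pv_equiv track=rewrite | github.com/theGreatHerrLebert/proteolizard-algorithm | python/proteolizardalgo/utility.py | tokenize_proforma_sequence
-- ===== SOURCE A (Python) =====
-- def is_unimod_start(char:str):
--     """
--     Tests if char is start of unimod
--     bracket
--
--     :param char: Character of a proForma formatted aa sequence
--     :type char: str
--     :return: Wether char is start of unimod bracket
--     :rtype: bool
--     """
--     if char in ["(","[","{"]:
--         return True
--     else:
--         return False
--
-- def is_unimod_end(char:str):
--     """
--     Tests if char is end of unimod
--     bracket
--
--     :param char: Character of a proForma formatted aa sequence
--     :type char: str
--     :return: Wether char is end of unimod bracket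
--     :rtype: bool
--     """
--     if char in [")","]","}"]:
--         return True
--     else:
--         return False
--
-- def tokenize_proforma_sequence(sequence: str):
--     """
--     Tokenize a ProForma formatted sequence string.
--
--     :param sequence: Sequence string (ProForma formatted)
--     :type sequence: str
--     :return: List of tokens
--     :rtype: List
--     """
--     sequence = sequence.upper().replace("(","[").replace(")","]")
--     token_list = ["<START>"]
--     in_unimod_bracket = False
--     tmp_token = ""
--
--     for aa in sequence:
--         if is_unimod_start(aa):
--             in_unimod_bracket = True
--         if in_unimod_bracket:
--             if is_unimod_end(aa):
--                 in_unimod_bracket = False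
--             tmp_token += aa
--             continue
--         if tmp_token != "":
--             token_list.append(tmp_token)
--             tmp_token = ""
--         tmp_token += aa
--
--     if tmp_token != "":
--         token_list.append(tmp_token)
--
--     if len(token_list) > 1:
--         if token_list[1].find("UNIMOD:1") != -1:
--             token_list[1] = "<START>"+token_list[1]
--             token_list = token_list[1:]
--     token_list.append("<END>")
--
--     return token_list
-- ===== SOURCE B (Python) =====
-- OPEN = "([{"
-- CLOSE = ")]}"
--
-- def _next_token(cs):
--     """cs holds the remaining characters in reverse (cs[-1] is the next one).
--     Consume one token: an optional leading non-open char followed by any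
--     number of bracket groups."""
--     tok = []
--     if cs[-1] not in OPEN:
--         tok.append(cs.pop())
--     while cs and cs[-1] in OPEN:
--         tok.append(cs.pop())
--         while cs and cs[-1] not in CLOSE:
--             tok.append(cs.pop())
--         if cs:
--             tok.append(cs.pop())
--     return "".join(tok)
--
-- def tokenize_proforma_sequence(sequence: str):
--     s = sequence.upper().replace("(", "[").replace(")", "]")
--     tokens = ["<START>"]
--     cs = list(s)[::-1]
--     while cs:
--         tokens.append(_next_token(cs))
--     if len(tokens) > 1 and "UNIMOD:1" in tokens[1]:
--         tokens = ["<START>" + tokens[1]] + tokens[2:]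
--     tokens.append("<END>")
--     return tokens
-- ===== Notes on version B (the rewrite author's own statement) =====
-- stated objective: alternative
-- what changed: Replaced A's char-by-char loop with an in-bracket flag and a pending tmp_token accumulator by a token-at-a-time recursive-descent tokenizer that consumes one whole token (optional lead char plus any run of bracket groups) per step; pre/post-processing (upper, paren normalisation, <START>/<END>, UNIMOD:1 merge) unchanged.
import Mathlib
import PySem

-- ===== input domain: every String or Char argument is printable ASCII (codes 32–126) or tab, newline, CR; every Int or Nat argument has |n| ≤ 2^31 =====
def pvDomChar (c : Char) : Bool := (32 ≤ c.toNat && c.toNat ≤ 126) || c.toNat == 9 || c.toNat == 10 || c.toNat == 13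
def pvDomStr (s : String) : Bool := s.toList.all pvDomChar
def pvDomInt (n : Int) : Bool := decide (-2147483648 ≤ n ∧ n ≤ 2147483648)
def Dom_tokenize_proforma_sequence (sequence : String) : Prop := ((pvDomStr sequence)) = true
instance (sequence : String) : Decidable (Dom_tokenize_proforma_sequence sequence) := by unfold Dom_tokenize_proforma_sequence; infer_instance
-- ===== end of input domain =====

-- B replaces A's char-by-char bracket-flag state machine by a token-at-a-time
-- recursive-descent tokenizer (one token = optional lead char + bracket groups);
-- objective: alternative structure, same exact output.

-- ===== PORT A =====
-- is_unimod_start (char arguments are single-char strings, ported as Char)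
def pvIsUnimodStart (c : Char) : Bool := c = '(' || c = '[' || c = '{'
-- is_unimod_end
def pvIsUnimodEnd (c : Char) : Bool := c = ')' || c = ']' || c = '}'

-- the body of A's `for aa in sequence` loop; state = (token_list, in_unimod_bracket, tmp_token)
def pvStepA (st : List (List Char) × Bool × List Char) (aa : Char) : List (List Char) × Bool × List Char :=
  let (token_list, inB, tmp) := st
  let inB := if pvIsUnimodStart aa then true else inB
  if inB then
    let inB := if pvIsUnimodEnd aa then false else inB
    (token_list, inB, tmp ++ [aa])
  else
    let (token_list, tmp) :=
      if tmp ≠ [] then (token_list ++ [tmp], ([] : List Char)) else (token_list, tmp)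
    (token_list, inB, tmp ++ [aa])

def tokenize_proforma_sequence (sequence : String) : List String :=
  let s := PySem.Str.replace (PySem.Str.replace (PySem.Str.upper sequence) "(" "[") ")" "]"
  let st := s.toList.foldl pvStepA (["<START>".toList], false, [])
  let token_list := if st.2.2 ≠ [] then st.1 ++ [st.2.2] else st.1
  -- `token_list[1] = "<START>"+token_list[1]; token_list = token_list[1:]`
  -- = a new head consed onto token_list.drop 2
  let token_list :=
    if token_list.length > 1 then
      if PySem.Chars.find (token_list[1]!) "UNIMOD:1".toList ≠ -1 then
        ("<START>".toList ++ token_list[1]!) :: token_list.drop 2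
      else token_list
    else token_list
  (token_list ++ ["<END>".toList]).map String.ofList

-- ===== PORT B =====
def pvIsOpen (c : Char) : Bool := c = '(' || c = '[' || c = '{'   -- c in OPEN
def pvIsClose (c : Char) : Bool := c = ')' || c = ']' || c = '}'  -- c in CLOSE

-- B keeps the remaining chars as a reversed Python list and pops from its end;
-- here that buffer is the plain list of remaining chars, consumed from the front.
-- inner `while cs and cs[-1] not in CLOSE` of _next_token: (consumed, rest)
def pvSpanBody : List Char → List Char × List Char
  | [] => ([], [])
  | c :: cs =>
    if pvIsClose c then ([], c :: cs)
    else
      let p := pvSpanBody cs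
      (c :: p.1, p.2)

theorem pvSpanBody_len (cs : List Char) : (pvSpanBody cs).2.length ≤ cs.length := by
  induction cs with
  | nil => simp [pvSpanBody]
  | cons c cs ih =>
    simp only [pvSpanBody]
    split
    · simp
    · simpa using Nat.le_succ_of_le ih

-- outer `while cs and cs[-1] in OPEN` of _next_token: (consumed groups, rest)
def pvGroups : List Char → List Char × List Char
  | [] => ([], [])
  | c :: cs =>
    if pvIsOpen c then
      match h : pvSpanBody cs with
      | (b, []) => (c :: b, [])
      | (b, d :: r) =>
        let p := pvGroups r
        (c :: b ++ d :: p.1, p.2)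
    else ([], c :: cs)
termination_by cs => cs.length
decreasing_by
  have := pvSpanBody_len cs
  rw [h] at this
  simp only [List.length_cons] at this ⊢
  omega

theorem pvGroups_nil : pvGroups [] = ([], []) := by rw [pvGroups]

theorem pvGroups_not_open {c : Char} (cs : List Char) (h : pvIsOpen c = false) :
    pvGroups (c :: cs) = ([], c :: cs) := by
  rw [pvGroups, if_neg (by simp [h])]

theorem pvGroups_open_end {c : Char} {cs b : List Char} (hO : pvIsOpen c = true)
    (h : pvSpanBody cs = (b, [])) : pvGroups (c :: cs) = (c :: b, []) := by
  rw [pvGroups, if_pos hO]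
  split <;> rename_i h' <;> rw [h] at h' <;> simp_all

theorem pvGroups_open_close {c d : Char} {cs b r : List Char} (hO : pvIsOpen c = true)
    (h : pvSpanBody cs = (b, d :: r)) :
    pvGroups (c :: cs) = (c :: b ++ d :: (pvGroups r).1, (pvGroups r).2) := by
  rw [pvGroups, if_pos hO]
  split <;> rename_i h' <;> rw [h] at h' <;> simp_all

theorem pvGroups_len (cs : List Char) : (pvGroups cs).2.length ≤ cs.length := by
  induction hn : cs.length using Nat.strong_induction_on generalizing cs with
  | _ n ih =>
    cases cs with
    | nil => simp [pvGroups_nil]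
    | cons c cs =>
      by_cases hO : pvIsOpen c = true
      · rcases h : pvSpanBody cs with ⟨b, r⟩
        cases r with
        | nil => simp [pvGroups_open_end hO h]
        | cons d r2 =>
          rw [pvGroups_open_close hO h]
          have h2 := pvSpanBody_len cs
          rw [h] at h2
          simp only [List.length_cons] at h2
          have h3 := ih r2.length (by subst hn; simp; omega) r2 rfl
          subst hn
          simp only [List.length_cons]
          omega
      · rw [pvGroups_not_open cs (by simpa using hO)]
        dsimp only
        omega

-- the `while cs:` driver of tokenize_proforma_sequence (B): the list of tokens
def pvTokens : List Char → List (List Char)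
  | [] => []
  | c :: cs =>
    if pvIsOpen c then
      let p := pvGroups (c :: cs)
      p.1 :: pvTokens p.2
    else
      let p := pvGroups cs
      (c :: p.1) :: pvTokens p.2
termination_by cs => cs.length
decreasing_by
  · rename_i hopen
    have h1 : ((pvGroups (c :: cs)).2).length ≤ cs.length := by
      rcases h : pvSpanBody cs with ⟨b, r⟩
      cases r with
      | nil => simp [pvGroups_open_end hopen h]
      | cons d r2 =>
        rw [pvGroups_open_close hopen h]
        have h2 := pvSpanBody_len cs
        rw [h] at h2
        have h3 := pvGroups_len r2
        simp only [List.length_cons] at h2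
        dsimp only
        omega
    simp only [List.length_cons]
    omega
  · have := pvGroups_len cs
    simp only [List.length_cons]
    omega

def tokenize_proforma_sequence_alt (sequence : String) : List String :=
  let s := PySem.Str.replace (PySem.Str.replace (PySem.Str.upper sequence) "(" "[") ")" "]"
  let tokens := "<START>".toList :: pvTokens s.toList
  -- `tokens = ["<START>"+tokens[1]] + tokens[2:]`
  let tokens :=
    if tokens.length > 1 ∧ PySem.Chars.isIn "UNIMOD:1".toList (tokens[1]!) then
      ("<START>".toList ++ tokens[1]!) :: tokens.drop 2
    else tokens
  (tokens ++ ["<END>".toList]).map String.ofList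

-- ===== PRECONDITION & SPEC =====
def Spec_tokenize_proforma_sequence (sequence : String) (out : List String) : Prop := out = tokenize_proforma_sequence_alt sequence
instance (sequence : String) (out : List String) : Decidable (Spec_tokenize_proforma_sequence sequence out) := by unfold Spec_tokenize_proforma_sequence; infer_instance

-- ===== CLAIM (what is proved, stated in full; the proofs are below) =====
def Claim_equal_tokenize_proforma_sequence : Prop := ∀ (sequence : String), Dom_tokenize_proforma_sequence sequence → Spec_tokenize_proforma_sequence sequence (tokenize_proforma_sequence sequence)

-- ===== LEMMAS AND PROOFS =====

theorem pvTokens_nil : pvTokens [] = [] := by rw [pvTokens]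

theorem pvTokens_cons_open {c : Char} (cs : List Char) (h : pvIsOpen c = true) :
    pvTokens (c :: cs) = (pvGroups (c :: cs)).1 :: pvTokens (pvGroups (c :: cs)).2 := by
  rw [pvTokens]
  simp [h]

theorem pvTokens_cons_not {c : Char} (cs : List Char) (h : pvIsOpen c = false) :
    pvTokens (c :: cs) = (c :: (pvGroups cs).1) :: pvTokens (pvGroups cs).2 := by
  rw [pvTokens]
  simp [h]


-- A's loop followed by the final flush of tmp_token, as a function of the remaining input
def pvRunA (cs : List Char) (acc : List (List Char)) (tmp : List Char) (inB : Bool) : List (List Char) :=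
  let st := cs.foldl pvStepA (acc, inB, tmp)
  if st.2.2 ≠ [] then st.1 ++ [st.2.2] else st.1

theorem pvNotCloseOfOpen {c : Char} (h : pvIsOpen c = true) : pvIsUnimodEnd c = false := by
  simp only [pvIsOpen, Bool.or_eq_true, decide_eq_true_eq] at h
  rcases h with (h | h) | h <;> subst h <;> decide

theorem pvStartEqOpen (c : Char) : pvIsUnimodStart c = pvIsOpen c := rfl

theorem pvEndEqClose (c : Char) : pvIsUnimodEnd c = pvIsClose c := rfl

-- the main invariant: A's loop from a pending-token / in-bracket state produces B's tokens
theorem pvPQ (cs : List Char) :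
    (∀ acc tmp, tmp ≠ [] →
      pvRunA cs acc tmp false =
        acc ++ (tmp ++ (pvGroups cs).1) :: pvTokens (pvGroups cs).2) ∧
    (∀ acc tmp, tmp ≠ [] →
      pvRunA cs acc tmp true =
        match pvSpanBody cs with
        | (b, []) => acc ++ [tmp ++ b]
        | (b, d :: r) =>
          acc ++ (tmp ++ b ++ d :: (pvGroups r).1) :: pvTokens (pvGroups r).2) := by
  induction cs with
  | nil =>
    constructor <;> intro acc tmp htmp <;>
      simp [pvRunA, pvGroups_nil, pvSpanBody, pvTokens_nil, htmp]
  | cons c cs ih =>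
    obtain ⟨ihP, ihQ⟩ := ih
    constructor
    · intro acc tmp htmp
      by_cases hO : pvIsOpen c = true
      · have hE := pvNotCloseOfOpen hO
        have hrun : pvRunA (c :: cs) acc tmp false = pvRunA cs acc (tmp ++ [c]) true := by
          simp [pvRunA, List.foldl, pvStepA, pvStartEqOpen, hO, hE]
        rw [hrun, ihQ acc (tmp ++ [c]) (by simp)]
        rcases h : pvSpanBody cs with ⟨b, r⟩
        cases r with
        | nil => simp [pvGroups_open_end hO h, pvTokens_nil]
        | cons d r2 => simp [pvGroups_open_close hO h]
      · have hO' : pvIsOpen c = false := by simpa using hO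
        have hrun : pvRunA (c :: cs) acc tmp false = pvRunA cs (acc ++ [tmp]) [c] false := by
          simp [pvRunA, List.foldl, pvStepA, pvStartEqOpen, hO', htmp]
        rw [hrun, ihP (acc ++ [tmp]) [c] (by simp)]
        rw [pvGroups_not_open cs hO', pvTokens_cons_not cs hO']
        simp
    · intro acc tmp htmp
      by_cases hE : pvIsClose c = true
      · have hrun : pvRunA (c :: cs) acc tmp true = pvRunA cs acc (tmp ++ [c]) false := by
          by_cases hO : pvIsUnimodStart c = true <;>
            simp [pvRunA, List.foldl, pvStepA, hO, pvEndEqClose, hE]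
        rw [hrun, ihP acc (tmp ++ [c]) (by simp)]
        simp only [pvSpanBody, hE, if_pos rfl]
        simp
      · have hE' : pvIsClose c = false := by simpa using hE
        have hrun : pvRunA (c :: cs) acc tmp true = pvRunA cs acc (tmp ++ [c]) true := by
          by_cases hO : pvIsUnimodStart c = true <;>
            simp [pvRunA, List.foldl, pvStepA, hO, pvEndEqClose, hE']
        rw [hrun, ihQ acc (tmp ++ [c]) (by simp)]
        simp only [pvSpanBody, hE']
        rcases h : pvSpanBody cs with ⟨b, r⟩
        cases r with
        | nil => simp
        | cons d r2 => simp

-- from the starting state, A's loop produces exactly B's token list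
theorem pvRunA_eq_tokens (cs : List Char) (acc : List (List Char)) :
    pvRunA cs acc [] false = acc ++ pvTokens cs := by
  cases cs with
  | nil => simp [pvRunA, pvTokens_nil]
  | cons c cs =>
    by_cases hO : pvIsOpen c = true
    · have hE := pvNotCloseOfOpen hO
      have hrun : pvRunA (c :: cs) acc [] false = pvRunA cs acc [c] true := by
        simp [pvRunA, List.foldl, pvStepA, pvStartEqOpen, hO, hE]
      rw [hrun, (pvPQ cs).2 acc [c] (by simp)]
      rw [pvTokens_cons_open cs hO]
      rcases h : pvSpanBody cs with ⟨b, r⟩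
      cases r with
      | nil => simp [pvGroups_open_end hO h, pvTokens_nil]
      | cons d r2 => simp [pvGroups_open_close hO h]
    · have hO' : pvIsOpen c = false := by simpa using hO
      have hrun : pvRunA (c :: cs) acc [] false = pvRunA cs acc [c] false := by
        simp [pvRunA, List.foldl, pvStepA, pvStartEqOpen, hO']
      rw [hrun, (pvPQ cs).1 acc [c] (by simp)]
      rw [pvTokens_cons_not cs hO']
      simp
theorem pvFind_eq_isIn (x u : List Char) :
    (PySem.Chars.find x u ≠ -1) = (PySem.Chars.isIn u x = true) := by
  rw [PySem.Chars.find_ne_neg_one_iff, ← PySem.Chars.isIn_iff_infix]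

-- ===== VERDICT (by name: the statement is the Claim_ definition above) =====
theorem tokenize_proforma_sequence_spec : Claim_equal_tokenize_proforma_sequence := by
  intro sequence _
  unfold Spec_tokenize_proforma_sequence tokenize_proforma_sequence tokenize_proforma_sequence_alt
  simp only []
  rw [show (if ((PySem.Str.replace (PySem.Str.replace (PySem.Str.upper sequence) "(" "[") ")" "]").toList.foldl pvStepA (["<START>".toList], false, [])).2.2 ≠ [] then
      ((PySem.Str.replace (PySem.Str.replace (PySem.Str.upper sequence) "(" "[") ")" "]").toList.foldl pvStepA (["<START>".toList], false, [])).1 ++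
        [((PySem.Str.replace (PySem.Str.replace (PySem.Str.upper sequence) "(" "[") ")" "]").toList.foldl pvStepA (["<START>".toList], false, [])).2.2]
    else ((PySem.Str.replace (PySem.Str.replace (PySem.Str.upper sequence) "(" "[") ")" "]").toList.foldl pvStepA (["<START>".toList], false, [])).1)
    = "<START>".toList :: pvTokens (PySem.Str.replace (PySem.Str.replace (PySem.Str.upper sequence) "(" "[") ")" "]").toList from by
      have := pvRunA_eq_tokens (PySem.Str.replace (PySem.Str.replace (PySem.Str.upper sequence) "(" "[") ")" "]").toList ["<START>".toList]
      simpa [pvRunA] using this]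
  cases hts : pvTokens (PySem.Str.replace (PySem.Str.replace (PySem.Str.upper sequence) "(" "[") ")" "]").toList with
  | nil => simp
  | cons h2 t2 =>
    simp only [List.length_cons, pvFind_eq_isIn]
    by_cases hin : PySem.Chars.isIn "UNIMOD:1".toList ((("<START>".toList) :: h2 :: t2)[1]!) = true
    · simp only [List.getElem!_cons_succ, List.getElem!_cons_zero] at hin ⊢
      simp [hin]
    · simp only [List.getElem!_cons_succ, List.getElem!_cons_zero] at hin ⊢
      simp [hin]
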